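-- pv_equiv track=rewrite | github.com/Dattebayo13/staticdex | data/generate_json.py | deduplicate_releases
-- ===== SOURCE A (Python) =====
-- def deduplicate_releases(releases):
--     groups = {}
--     for release in releases:
--         base_name = release.replace(" (Dual Audio)", "")
--         if base_name not in groups:
--             groups[base_name] = []
--         groups[base_name].append(release)
--
--     result = []
--     for base_name, versions in groups.items():
--         if len(versions) > 1:
--             dual_version = f"{base_name} (Dual Audio)"
--             if dual_version in versions:
--                 result.append(dual_version)
--             else:
--                 result.append(versions[0])
--         else:
--             result.append(versions[0])
--     return result
-- ===== SOURCE B (Python) =====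
-- def deduplicate_releases(releases):
--     order = []
--     chosen = {}
--     for release in releases:
--         base_name = release.replace(" (Dual Audio)", "")
--         dual_version = f"{base_name} (Dual Audio)"
--         if base_name not in chosen:
--             order.append(base_name)
--             chosen[base_name] = release
--         elif release == dual_version:
--             chosen[base_name] = dual_version
--     return [chosen[b] for b in order]
-- ===== Notes on version B (the rewrite author's own statement) =====
-- stated objective: simpler
-- what changed: Single pass keeping one chosen representative per base name in a dict plus a first-appearance order list, instead of building per-group version lists and then running a second selection pass over the groups.
import Mathlib
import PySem

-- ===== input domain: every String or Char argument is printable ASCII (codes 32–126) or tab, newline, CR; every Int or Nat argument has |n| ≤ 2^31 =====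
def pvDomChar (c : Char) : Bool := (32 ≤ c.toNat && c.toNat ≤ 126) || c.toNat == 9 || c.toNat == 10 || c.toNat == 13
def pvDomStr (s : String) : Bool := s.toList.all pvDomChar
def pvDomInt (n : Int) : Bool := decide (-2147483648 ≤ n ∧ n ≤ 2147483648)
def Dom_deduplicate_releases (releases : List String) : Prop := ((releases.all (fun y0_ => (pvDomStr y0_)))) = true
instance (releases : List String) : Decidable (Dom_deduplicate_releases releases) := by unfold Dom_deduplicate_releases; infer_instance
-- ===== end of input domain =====

-- B replaces A's build-per-group-lists-then-select-in-a-second-pass with a single pass that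
-- keeps one chosen representative per base name (objective: simpler).

-- shared helper: release.replace(" (Dual Audio)", "")
def pvBase (r : String) : String := PySem.Str.replace r " (Dual Audio)" ""

-- ===== PORT A =====
def deduplicate_releases (releases : List String) : List String :=
  -- 'if base not in groups: groups[base] = []' + 'groups[base].append(release)' = modify with default []
  let groups : PySem.Dict String (List String) :=
    releases.foldl (fun g release => g.modify (pvBase release) [] (· ++ [release])) PySem.Dict.empty
  groups.items.foldl (fun result p =>
    if 1 < PySem.List.len p.2 then
      let dual := p.1 ++ " (Dual Audio)"
      if p.2.contains dual then result ++ [dual]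
      -- versions[0]: every group is nonempty, so Python's versions[0] never raises; default "" unreachable
      else result ++ [PySem.List.pyGetD p.2 0 ""]
    else result ++ [PySem.List.pyGetD p.2 0 ""]) []

-- ===== PORT B =====
def deduplicate_releases_alt (releases : List String) : List String :=
  let st : List String × PySem.Dict String String :=
    releases.foldl (fun st release =>
      let base := pvBase release
      let dual := base ++ " (Dual Audio)"
      if st.2.contains base = false then
        (st.1 ++ [base], st.2.insert base release)
      else if release == dual then
        (st.1, st.2.insert base dual)
      else st)
      ([], PySem.Dict.empty)
  -- chosen[b]: every b in order is a key of chosen, so Python's lookup never raises; default "" unreachable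
  st.1.map (fun b => st.2.getD b "")

-- ===== PRECONDITION & SPEC =====
def Spec_deduplicate_releases (releases : List String) (out : List String) : Prop := out = deduplicate_releases_alt releases
instance (releases : List String) (out : List String) : Decidable (Spec_deduplicate_releases releases out) := by unfold Spec_deduplicate_releases; infer_instance

-- ===== CLAIM (what is proved, stated in full; the proofs are below) =====
def Claim_equal_deduplicate_releases : Prop := ∀ (releases : List String), Dom_deduplicate_releases releases → Spec_deduplicate_releases releases (deduplicate_releases releases)

-- ===== LEMMAS AND PROOFS =====

-- common specification: for each base name b (in first-appearance order), the chosen release is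
-- the dual version if the group contains it, else the group's first release
def pvDual (b : String) : String := b ++ " (Dual Audio)"
def pvVers (l : List String) (b : String) : List String := l.filter (fun r => pvBase r == b)
def pvPick (l : List String) (b : String) : String :=
  if pvDual b ∈ pvVers l b then pvDual b else (pvVers l b).getD 0 ""
def pvS (l : List String) : List String := PySem.Set.ofList (l.map pvBase)
def pvGroups (l : List String) : PySem.Dict String (List String) :=
  l.foldl (fun g release => g.modify (pvBase release) [] (· ++ [release])) PySem.Dict.empty
def pvChosen (l : List String) : PySem.Dict String String :=
  PySem.Dict.mk ((pvS l).map (fun b => (b, pvPick l b)))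
def pvSelA (p : String × List String) : String :=
  if 1 < PySem.List.len p.2 then
    if p.2.contains (p.1 ++ " (Dual Audio)") then p.1 ++ " (Dual Audio)"
    else PySem.List.pyGetD p.2 0 ""
  else PySem.List.pyGetD p.2 0 ""

theorem pvS_append (l : List String) (r : String) :
    pvS (l ++ [r]) = PySem.Set.add (pvS l) (pvBase r) := by
  simp [pvS, PySem.Set.ofList_append_singleton]

theorem mem_pvS {l : List String} {b : String} : b ∈ pvS l ↔ ∃ r ∈ l, pvBase r = b := by
  simp [pvS, PySem.Set.mem_ofList]

theorem pvVers_append (l : List String) (r b : String) :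
    pvVers (l ++ [r]) b = pvVers l b ++ if pvBase r = b then [r] else [] := by
  by_cases h : pvBase r = b <;> simp [pvVers, List.filter_append, h]

theorem pvVers_ne_nil {l : List String} {b : String} (h : b ∈ pvS l) : pvVers l b ≠ [] := by
  obtain ⟨r, hr, rfl⟩ := mem_pvS.1 h
  have hm : r ∈ pvVers l (pvBase r) := List.mem_filter.2 ⟨hr, by simp⟩
  intro hnil
  rw [hnil] at hm
  cases hm

theorem pvPick_append_ne {l : List String} {r b : String} (h : pvBase r ≠ b) :
    pvPick (l ++ [r]) b = pvPick l b := by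
  simp [pvPick, pvVers_append, h]

theorem pvPick_append_self_dual (l : List String) (r : String) (h : r = pvDual (pvBase r)) :
    pvPick (l ++ [r]) (pvBase r) = pvDual (pvBase r) := by
  have hv : pvVers (l ++ [r]) (pvBase r) = pvVers l (pvBase r) ++ [r] := by
    simp [pvVers_append]
  simp [pvPick, hv, ← h]

theorem pvPick_append_self_notdual (l : List String) (r : String)
    (h : r ≠ pvDual (pvBase r)) (hmem : pvBase r ∈ pvS l) :
    pvPick (l ++ [r]) (pvBase r) = pvPick l (pvBase r) := by
  have hv : pvVers (l ++ [r]) (pvBase r) = pvVers l (pvBase r) ++ [r] := by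
    simp [pvVers_append]
  have hdm : pvDual (pvBase r) ∈ pvVers (l ++ [r]) (pvBase r) ↔
      pvDual (pvBase r) ∈ pvVers l (pvBase r) := by
    rw [hv]
    simp only [List.mem_append, List.mem_singleton]
    constructor
    · rintro (hx | hx)
      · exact hx
      · exact absurd hx.symm h
    · exact Or.inl
  obtain ⟨x, vs, hx⟩ := List.exists_cons_of_ne_nil (pvVers_ne_nil hmem)
  unfold pvPick
  by_cases hm2 : pvDual (pvBase r) ∈ pvVers l (pvBase r)
  · rw [if_pos (hdm.2 hm2), if_pos hm2]
  · rw [if_neg (fun hc => hm2 (hdm.1 hc)), if_neg hm2, hv, hx, List.cons_append,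
      List.getD_cons_zero, List.getD_cons_zero]

theorem pvPick_append_fresh (l : List String) (r : String) (hmem : pvBase r ∉ pvS l) :
    pvPick (l ++ [r]) (pvBase r) = r := by
  have h0 : pvVers l (pvBase r) = [] := by
    rw [pvVers, List.filter_eq_nil_iff]
    intro a ha hba
    exact hmem (mem_pvS.2 ⟨a, ha, by simpa using hba⟩)
  have hv : pvVers (l ++ [r]) (pvBase r) = [r] := by
    simp [pvVers_append, h0]
  by_cases hd : pvDual (pvBase r) = r
  · simp [pvPick, hv, hd]
  · simp [pvPick, hv, hd]

theorem pvChosen_keys (l : List String) : (pvChosen l).keys = pvS l := by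
  simp [pvChosen, PySem.Dict.keys_mk, List.map_map, Function.comp_def]

theorem pvChosen_contains {l : List String} {b : String} :
    (pvChosen l).contains b = true ↔ b ∈ pvS l := by
  rw [PySem.Dict.contains_iff_mem_keys, pvChosen_keys]

theorem pvChosen_items (l : List String) :
    (pvChosen l).items = (pvS l).map (fun b => (b, pvPick l b)) := rfl

-- ===== A side =====

theorem pvGroups_getD (l : List String) (b : String) :
    (pvGroups l).getD b [] = pvVers l b := by
  induction l using List.reverseRecOn with
  | nil => simp [pvGroups, pvVers, PySem.Dict.getD_empty]
  | append_singleton l r ih =>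
    rw [pvGroups, List.foldl_append]
    simp only [List.foldl_cons, List.foldl_nil]
    rw [← pvGroups, PySem.Dict.getD_modify, pvVers_append]
    by_cases h : pvBase r = b
    · rw [if_pos h.symm, if_pos h, h, ih]
    · rw [if_neg (fun hh => h hh.symm), if_neg h, ih]
      simp

theorem pvGroups_keys (l : List String) : (pvGroups l).keys = pvS l := by
  rw [pvGroups, PySem.Dict.keys_foldl_modify_key]
  simp [pvS, PySem.Dict.keys_empty, PySem.Set.update_nil_left]

theorem pvSelA_eq_pick (l : List String) (b : String) (hb : b ∈ pvS l) :
    pvSelA (b, pvVers l b) = pvPick l b := by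
  obtain ⟨x, vs, hx⟩ := List.exists_cons_of_ne_nil (pvVers_ne_nil hb)
  simp only [pvSelA, pvPick, hx, PySem.List.len_eq, PySem.List.pyGetD_zero_cons,
    List.getD_cons_zero]
  have hco : (x :: vs).contains (b ++ " (Dual Audio)") = true ↔ pvDual b ∈ x :: vs := by
    simp [pvDual]
  by_cases hlen : vs = []
  · subst hlen
    rw [if_neg (by norm_num)]
    by_cases hm : pvDual b ∈ [x]
    · rw [if_pos hm]
      simp only [List.mem_singleton] at hm
      exact hm.symm
    · rw [if_neg hm]
  · have h1 : 1 < ((x :: vs).length : Int) := by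
      have : vs ≠ [] := hlen
      have hpos : 0 < vs.length := List.length_pos_iff.2 this
      simp only [List.length_cons]
      push_cast
      omega
    rw [if_pos h1]
    by_cases hm : pvDual b ∈ x :: vs
    · rw [if_pos (hco.2 hm), if_pos hm, pvDual]
    · rw [if_neg (fun hc => hm (hco.1 hc)), if_neg hm]

theorem a_eq_spec (l : List String) : deduplicate_releases l = (pvS l).map (pvPick l) := by
  have h1 : deduplicate_releases l
      = (pvGroups l).items.foldl (fun result p =>
          if 1 < PySem.List.len p.2 then
            let dual := p.1 ++ " (Dual Audio)"
            if p.2.contains dual then result ++ [dual]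
            else result ++ [PySem.List.pyGetD p.2 0 ""]
          else result ++ [PySem.List.pyGetD p.2 0 ""]) [] := rfl
  have h2 : deduplicate_releases l
      = (pvGroups l).items.foldl (fun result p => result ++ [pvSelA p]) [] := by
    rw [h1]
    exact PySem.List.foldl_congr_mem _ _ _ _ (fun acc p _ => by
      simp only [pvSelA]
      split_ifs <;> rfl)
  have hnd : (pvGroups l).keys.Nodup := by
    rw [pvGroups_keys]
    exact PySem.Set.nodup_ofList _
  have hitems : (pvGroups l).items = (pvS l).map (fun b => (b, pvVers l b)) := by
    rw [PySem.Dict.items_eq_map_keys (pvGroups l) hnd ([] : List String), pvGroups_keys]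
    exact List.map_congr_left (fun b _ => by rw [pvGroups_getD])
  rw [h2, hitems, PySem.List.foldl_append_singleton_eq_map, List.nil_append, List.map_map]
  exact List.map_congr_left (fun b hb => pvSelA_eq_pick l b hb)

-- ===== B side =====

theorem bfold_eq (l : List String) :
    l.foldl (fun st release =>
      let base := pvBase release
      let dual := base ++ " (Dual Audio)"
      if st.2.contains base = false then
        (st.1 ++ [base], st.2.insert base release)
      else if release == dual then
        (st.1, st.2.insert base dual)
      else st)
      (([], PySem.Dict.empty) : List String × PySem.Dict String String)
    = (pvS l, pvChosen l) := by
  induction l using List.reverseRecOn with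
  | nil => rfl
  | append_singleton l r ih =>
    rw [List.foldl_append, ih]
    simp only [List.foldl_cons, List.foldl_nil]
    by_cases hmem : pvBase r ∈ pvS l
    · have hc : (pvChosen l).contains (pvBase r) = true := pvChosen_contains.2 hmem
      have hSeq : pvS (l ++ [r]) = pvS l := by
        rw [pvS_append]
        exact PySem.Set.add_of_mem hmem
      rw [hc]
      simp only [Bool.true_eq_false, if_false]
      by_cases hd : r = pvDual (pvBase r)
      · have hbeq : (r == pvBase r ++ " (Dual Audio)") = true := by
          rw [beq_iff_eq]
          exact hd
        rw [hbeq]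
        simp only [if_true]
        rw [Prod.mk.injEq]
        refine ⟨hSeq.symm, ?_⟩
        apply PySem.Dict.ext
        rw [PySem.Dict.items_insert_of_contains _ _ hc, pvChosen_items, pvChosen_items,
          hSeq, List.map_map]
        apply List.map_congr_left
        intro b hb
        by_cases hbb : b = pvBase r
        · subst hbb
          simp [pvPick_append_self_dual l r hd, pvDual]
        · simp [hbb, pvPick_append_ne (fun hh => hbb hh.symm)]
      · have hbeq : (r == pvBase r ++ " (Dual Audio)") = false := by
          rw [beq_eq_false_iff_ne]
          exact hd
        rw [hbeq]
        simp only [Bool.false_eq_true, if_false]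
        rw [Prod.mk.injEq]
        refine ⟨hSeq.symm, ?_⟩
        apply PySem.Dict.ext
        rw [pvChosen_items, pvChosen_items, hSeq]
        apply List.map_congr_left
        intro b hb
        by_cases hbb : b = pvBase r
        · subst hbb
          rw [pvPick_append_self_notdual l r hd hmem]
        · rw [pvPick_append_ne (fun hh => hbb hh.symm)]
    · have hc : (pvChosen l).contains (pvBase r) = false := by
        rw [← Bool.not_eq_true]
        intro hh
        exact hmem (pvChosen_contains.1 hh)
      have hSeq : pvS (l ++ [r]) = pvS l ++ [pvBase r] := by
        rw [pvS_append]
        exact PySem.Set.add_of_not_mem hmem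
      rw [hc]
      simp only [if_true]
      rw [Prod.mk.injEq]
      refine ⟨hSeq.symm, ?_⟩
      apply PySem.Dict.ext
      rw [PySem.Dict.items_insert_of_not_contains _ _ hc, pvChosen_items, pvChosen_items,
        hSeq, List.map_append, List.map_singleton]
      congr 1
      · apply List.map_congr_left
        intro b hb
        rw [pvPick_append_ne (fun hh => hmem (hh ▸ hb))]
      · rw [pvPick_append_fresh l r hmem]

theorem b_eq_spec (l : List String) : deduplicate_releases_alt l = (pvS l).map (pvPick l) := by
  have hnd : (pvChosen l).keys.Nodup := by
    rw [pvChosen_keys]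
    exact PySem.Set.nodup_ofList _
  unfold deduplicate_releases_alt
  rw [bfold_eq]
  show ((pvS l, pvChosen l).1).map (fun b => (pvS l, pvChosen l).2.getD b "") = (pvS l).map (pvPick l)
  apply List.map_congr_left
  intro b hb
  exact PySem.Dict.getD_of_mem_items (pvChosen l)
    (by rw [pvChosen_items]; exact List.mem_map.2 ⟨b, hb, rfl⟩) hnd ""

-- ===== VERDICT (by name: the statement is the Claim_ definition above) =====
theorem deduplicate_releases_spec : Claim_equal_deduplicate_releases := by
  intro releases _
  unfold Spec_deduplicate_releases
  rw [a_eq_spec, b_eq_spec]
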